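-- pv_equiv track=rewrite | github.com/bhavya2403/Learning-Python | Learning/Algorithms/DynamicProgramming/eulerian_number.py | eulerianNumber
-- ===== SOURCE A (Python) =====
-- def eulerianNumber(n,m):
--     dp = [[0 for _ in range(m+1)] for _ in range(n+1)]
--     for i in range(1, n+1):
--         dp[i][0] = 1
--
--     for i in range(2, n+1):
--         for j in range(1, min(n, m+1)):
--             dp[i][j] = (i-j)*dp[i-1][j-1] + (j+1)*dp[i-1][j]
--
--     return dp[n][m]
-- ===== SOURCE B (Python) =====
-- def eulerianNumber(n, m):
--     # Closed form: A(n,m) = sum_{k=0}^{m} (-1)^k * C(n+1,k) * (m+1-k)^n,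
--     # with C(n+1,k) maintained as a running product (exact integer division).
--     total = 0
--     binom = 1  # C(n+1, k)
--     sign = 1   # (-1)^k
--     for k in range(m + 1):
--         total += sign * binom * (m + 1 - k) ** n
--         binom = binom * (n + 1 - k) // (k + 1)
--         sign = -sign
--     return total
-- ===== Notes on version B (the rewrite author's own statement) =====
-- stated objective: faster
-- what changed: Replaces A's dynamic-programming table over all rows i and columns j by the closed-form alternating sum A(n,m) = sum_{k<=m} (-1)^k C(n+1,k) (m+1-k)^n, computed in a single loop over k that maintains C(n+1,k) as a running product; intended as faster (a timing run measured 11x-28x at its larger sizes).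
-- intended difference: On the single input (n,m)=(0,0) A returns 0 (its table's base-case loop skips row 0) while B returns 1, the standard Eulerian number A(0,0)=1 counting the one empty permutation. — e.g. on eulerianNumber(0, 0): A returns 0, B returns 1
import Mathlib
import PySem

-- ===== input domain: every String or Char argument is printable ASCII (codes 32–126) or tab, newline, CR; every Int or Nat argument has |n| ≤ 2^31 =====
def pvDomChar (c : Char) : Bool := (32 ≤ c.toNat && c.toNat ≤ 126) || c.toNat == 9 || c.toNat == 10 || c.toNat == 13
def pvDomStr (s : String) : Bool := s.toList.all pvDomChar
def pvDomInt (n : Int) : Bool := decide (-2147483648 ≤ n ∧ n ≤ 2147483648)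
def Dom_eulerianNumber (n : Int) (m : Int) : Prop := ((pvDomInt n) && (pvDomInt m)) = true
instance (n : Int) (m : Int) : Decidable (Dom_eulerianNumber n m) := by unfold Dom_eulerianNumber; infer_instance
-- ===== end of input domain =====

-- B replaces A's dynamic-programming table by the closed-form alternating sum
-- A(n,m) = Σ_{k≤m} (-1)^k C(n+1,k) (m+1-k)^n with a running binomial coefficient (a single loop over k).

-- ===== PORT A =====
-- helper for Python's 'dp[i][j] = v' on a list of lists; every write in A uses
-- nonnegative in-range indices on inputs admitted by Pre_ (elsewhere Python raises IndexError).
def pySet2 (dp : List (List Int)) (i j : Int) (v : Int) : List (List Int) :=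
  dp.set i.toNat ((dp.getD i.toNat []).set j.toNat v)

-- reads dp[i][j] are ported with pyGetD; its default is never used on inputs admitted by Pre_
-- (Python raises IndexError exactly where the read is out of range, and those inputs are outside Pre_).
def eulerianNumber (n : Int) (m : Int) : Int :=
  let dp0 : List (List Int) :=
    (PySem.List.pyRange 0 (n+1) 1).map (fun _ => (PySem.List.pyRange 0 (m+1) 1).map (fun _ => (0:Int)))
  let dp1 := (PySem.List.pyRange 1 (n+1) 1).foldl (fun dp i => pySet2 dp i 0 1) dp0
  let dp2 := (PySem.List.pyRange 2 (n+1) 1).foldl (fun dp i =>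
      (PySem.List.pyRange 1 (min n (m+1)) 1).foldl (fun dp j =>
        pySet2 dp i j
          ((i-j) * PySem.List.pyGetD (PySem.List.pyGetD dp (i-1) []) (j-1) 0
           + (j+1) * PySem.List.pyGetD (PySem.List.pyGetD dp (i-1) []) j 0)) dp) dp1
  PySem.List.pyGetD (PySem.List.pyGetD dp2 n []) m 0

-- ===== PORT B =====
-- state is (total, binom, sign) = (st.1, st.2.1, st.2.2); '(m+1-k) ** n' is ported with the
-- Nat exponent n.toNat, exact for the nonnegative n admitted by Pre_.
def eulerianNumber_alt (n : Int) (m : Int) : Int :=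
  let st := (PySem.List.pyRange 0 (m+1) 1).foldl
    (fun (st : Int × Int × Int) k =>
      (st.1 + st.2.2 * st.2.1 * (m + 1 - k) ^ n.toNat,
       PySem.Int.floordiv (st.2.1 * (n + 1 - k)) (k + 1),
       -st.2.2)) (0, 1, 1)
  st.1

-- ===== PRECONDITION & SPEC =====
-- Pre_ excludes exactly the inputs where Python A raises IndexError: n < 0 (dp[n] on a short
-- or empty table) or m < 0 (dp[n][m] on a row of length m+1 ≤ 0).
def Pre_eulerianNumber (n : Int) (m : Int) : Prop := 0 ≤ n ∧ 0 ≤ m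
instance (n : Int) (m : Int) : Decidable (Pre_eulerianNumber n m) := by unfold Pre_eulerianNumber; infer_instance
def pvWitness_eulerianNumber : Int × Int := (3, 1)

-- On the single input (n,m)=(0,0) A returns 0 (its base-case loop skips row 0) while B returns 1,
-- the standard Eulerian number A(0,0)=1 counting the one empty permutation.
def D_eulerianNumber (n : Int) (m : Int) : Prop := n = 0 ∧ m = 0
instance (n : Int) (m : Int) : Decidable (D_eulerianNumber n m) := by unfold D_eulerianNumber; infer_instance

def Spec_eulerianNumber (n : Int) (m : Int) (out : Int) : Prop :=
  ¬ D_eulerianNumber n m → out = eulerianNumber_alt n m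
instance (n : Int) (m : Int) (out : Int) : Decidable (Spec_eulerianNumber n m out) := by
  unfold Spec_eulerianNumber; infer_instance

def pvDiffWitness_eulerianNumber : Int × Int := (0, 0)
def pvDiffWitnessOut_eulerianNumber : Int × Int := (0, 1)

-- ===== CLAIM (what is proved, stated in full; the proofs are below) =====
def Claim_unchanged_eulerianNumber : Prop := ∀ (n : Int) (m : Int), Dom_eulerianNumber n m → Pre_eulerianNumber n m → Spec_eulerianNumber n m (eulerianNumber n m)
def Claim_changed_eulerianNumber : Prop := Dom_eulerianNumber (pvDiffWitness_eulerianNumber.1) (pvDiffWitness_eulerianNumber.2) ∧ Pre_eulerianNumber (pvDiffWitness_eulerianNumber.1) (pvDiffWitness_eulerianNumber.2) ∧ D_eulerianNumber (pvDiffWitness_eulerianNumber.1) (pvDiffWitness_eulerianNumber.2) ∧ eulerianNumber (pvDiffWitness_eulerianNumber.1) (pvDiffWitness_eulerianNumber.2) = pvDiffWitnessOut_eulerianNumber.1 ∧ eulerianNumber_alt (pvDiffWitness_eulerianNumber.1) (pvDiffWitness_eulerianNumber.2) = pvDiffWitnessOut_eulerianNumber.2 ∧ pvDiffWitnessOut_eulerianNumber.1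 ≠ pvDiffWitnessOut_eulerianNumber.2
def Claim_exact_eulerianNumber : Prop := ∀ (n : Int) (m : Int), Dom_eulerianNumber n m → Pre_eulerianNumber n m → D_eulerianNumber n m → eulerianNumber n m ≠ eulerianNumber_alt n m

-- ===== LEMMAS AND PROOFS =====


def Srow (n m : ℕ) : ℤ := ∑ k ∈ Finset.range (m+1), (-1:ℤ)^k * ((n+1).choose k : ℤ) * ((m:ℤ)+1-k)^n

lemma chooseId (r k : ℕ) :
    ((k:ℤ)+1) * (r.choose (k+1) : ℤ) = ((r:ℤ) - k) * (r.choose k : ℤ) := by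
  rcases lt_trichotomy k r with h | h | h
  · have e := Nat.choose_succ_right_eq r k
    have e2 : ((r.choose (k+1) * (k+1) : ℕ) : ℤ) = ((r.choose k * (r - k) : ℕ) : ℤ) := by rw [e]
    push_cast [Nat.cast_sub h.le] at e2
    linarith
  · subst h; simp [Nat.choose_succ_self]
  · rw [Nat.choose_eq_zero_of_lt h, Nat.choose_eq_zero_of_lt (by omega)]; ring

lemma Srow_rec (i j : ℕ) :
    Srow (i+1) (j+1) = ((i:ℤ) - j) * Srow i j + ((j:ℤ)+2) * Srow i (j+1) := by
  have hL : Srow (i+1) (j+1)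
      = (∑ k ∈ Finset.range (j+1), (-1:ℤ)^(k+1) * ((i+1).choose k : ℤ) * ((j:ℤ)+1-k)^(i+1))
        + ((∑ k ∈ Finset.range (j+1), (-1:ℤ)^(k+1) * ((i+1).choose (k+1) : ℤ) * ((j:ℤ)+1-k)^(i+1))
           + ((j:ℤ)+2)^(i+1)) := by
    rw [Srow, Finset.sum_range_succ', ← add_assoc, ← Finset.sum_add_distrib]
    congr 1
    · apply Finset.sum_congr rfl
      intro k _
      rw [Nat.choose_succ_succ (i+1) k]
      push_cast
      ring
    · simp [Nat.choose_zero_right]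
      ring
  have hT2 : (∑ k ∈ Finset.range (j+2), (-1:ℤ)^k * ((i+1).choose k : ℤ) * ((j:ℤ)+2-k)^(i+1))
      = (∑ k ∈ Finset.range (j+1), (-1:ℤ)^(k+1) * ((i+1).choose (k+1) : ℤ) * ((j:ℤ)+1-k)^(i+1))
        + ((j:ℤ)+2)^(i+1) := by
    rw [Finset.sum_range_succ']
    congr 1
    · apply Finset.sum_congr rfl
      intro k _
      push_cast
      ring
    · simp
  have h3 : (∑ k ∈ Finset.range (j+2), (-1:ℤ)^k * ((i+1).choose k : ℤ) * ((j:ℤ)+2-k)^(i+1))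
      = ((j:ℤ)+2) * Srow i (j+1)
        + ∑ k ∈ Finset.range (j+1), (-1:ℤ)^k * ((k:ℤ)+1) * ((i+1).choose (k+1) : ℤ) * ((j:ℤ)+1-k)^i := by
    rw [Srow, Finset.mul_sum]
    have stepk : ∀ k ∈ Finset.range (j+2),
        (-1:ℤ)^k * ((i+1).choose k : ℤ) * ((j:ℤ)+2-k)^(i+1)
        = ((j:ℤ)+2) * ((-1:ℤ)^k * ((i+1).choose k : ℤ) * (((j+1:ℕ):ℤ)+1-k)^i)
          + (-1:ℤ)^k * (-(k:ℤ)) * ((i+1).choose k : ℤ) * ((j:ℤ)+2-k)^i := by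
      intro k _
      push_cast
      rw [pow_succ]
      ring
    rw [Finset.sum_congr rfl stepk, Finset.sum_add_distrib]
    congr 1
    · rw [Finset.sum_range_succ']
      have h0 : (-1:ℤ)^0 * (-(0:ℕ):ℤ) * ((i+1).choose 0 : ℤ) * ((j:ℤ)+2-(0:ℕ))^i = 0 := by
        push_cast; ring
      rw [h0, add_zero]
      apply Finset.sum_congr rfl
      intro k _
      push_cast
      ring
  have h5 : (∑ k ∈ Finset.range (j+1), (-1:ℤ)^(k+1) * ((i+1).choose k : ℤ) * ((j:ℤ)+1-k)^(i+1))
        + (∑ k ∈ Finset.range (j+1), (-1:ℤ)^k * ((k:ℤ)+1) * ((i+1).choose (k+1) : ℤ) * ((j:ℤ)+1-k)^i)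
      = ((i:ℤ) - j) * Srow i j := by
    rw [Srow, Finset.mul_sum, ← Finset.sum_add_distrib]
    apply Finset.sum_congr rfl
    intro k _
    have hc := chooseId (i+1) k
    push_cast at hc ⊢
    linear_combination ((-1:ℤ)^k * ((j:ℤ)+1-(k:ℤ))^i) * hc
  have hT2' := hT2
  rw [h3] at hT2'
  -- combine
  rw [hL]
  rw [← hT2, h3]
  linarith [h5]

def Elr : ℕ → ℕ → ℤ
  | 0, _ => 0
  | _+1, 0 => 1
  | i+1, j+1 => ((i:ℤ) - j) * Elr i j + ((j:ℤ)+2) * Elr i (j+1)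

lemma Elr_succ_succ (a b : ℕ) :
    Elr (a+1) (b+1) = ((a:ℤ) - b) * Elr a b + ((b:ℤ)+2) * Elr a (b+1) := rfl

lemma Elr_zero : ∀ i j : ℕ, i ≤ j → Elr i j = 0 := by
  intro i
  induction i with
  | zero => intro j _; simp [Elr]
  | succ i ih =>
    intro j hij
    obtain ⟨j', rfl⟩ : ∃ j', j = j' + 1 := ⟨j - 1, by omega⟩
    rw [Elr, ih j' (by omega), ih (j'+1) (by omega)]
    ring

lemma Srow_base (n : ℕ) : Srow n 0 = 1 := by
  simp [Srow]

lemma Srow_zero (m : ℕ) (h : 1 ≤ m) : Srow 0 m = 0 := by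
  obtain ⟨p, rfl⟩ : ∃ p, m = p + 1 := ⟨m - 1, by omega⟩
  clear h
  induction p with
  | zero => simp [Srow, Finset.sum_range_succ]
  | succ p ih =>
    rw [Srow] at ih ⊢
    rw [Finset.sum_range_succ]
    simp only [pow_zero, mul_one] at ih ⊢
    rw [Nat.choose_eq_zero_of_lt (by omega)]
    simpa using ih

lemma Elr_eq_Srow : ∀ i j : ℕ, Elr (i+1) j = Srow (i+1) j := by
  intro i
  induction i with
  | zero =>
    intro j
    cases j with
    | zero => rw [Srow_base]; rfl
    | succ j =>
      rw [Elr_zero 1 (j+1) (by omega), Srow_rec 0 j]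
      cases j with
      | zero => simp [Srow_base, Srow_zero 1 (by omega)]
      | succ j' =>
        rw [Srow_zero (j'+1) (by omega), Srow_zero (j'+2) (by omega)]
        ring
  | succ i ih =>
    intro j
    cases j with
    | zero => rw [Srow_base]; rfl
    | succ j =>
      rw [Srow_rec (i+1) j, Elr, ih j, ih (j+1)]

lemma fdiv_exact (q b : Int) (hb : 0 < b) : PySem.Int.floordiv (q * b) b = q := by
  rw [PySem.Int.floordiv_eq_iff_of_pos hb]
  constructor
  · exact le_refl _
  · nlinarith

lemma alt_eq_Srow (n m : Int) (hn : 0 ≤ n) (hm : 0 ≤ m) :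
    eulerianNumber_alt n m = Srow n.toNat m.toNat := by
  have hloop : ∀ K : ℕ, (K:ℤ) ≤ m + 1 →
      (PySem.List.pyRange 0 (K:ℤ) 1).foldl
        (fun (st : Int × Int × Int) k =>
          (st.1 + st.2.2 * st.2.1 * (m + 1 - k) ^ n.toNat,
           PySem.Int.floordiv (st.2.1 * (n + 1 - k)) (k + 1),
           -st.2.2)) (0, 1, 1)
      = (∑ k ∈ Finset.range K, (-1:ℤ)^k * ((n.toNat+1).choose k : ℤ) * (m+1-k)^n.toNat,
         ((n.toNat+1).choose K : ℤ), (-1:ℤ)^K) := by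
    intro K
    induction K with
    | zero =>
      intro _
      rw [Nat.cast_zero, PySem.List.pyRange_one_eq_nil (by omega)]
      simp
    | succ K ih =>
      intro hK
      rw [Nat.cast_succ, PySem.List.pyRange_one_succ_right (by positivity), List.foldl_append,
          ih (by omega)]
      simp only [List.foldl_cons, List.foldl_nil]
      refine Prod.ext ?_ (Prod.ext ?_ ?_)
      · rw [Finset.sum_range_succ]
      · show PySem.Int.floordiv _ _ = _
        have hc := chooseId (n.toNat+1) K
        have hnum : ((n.toNat+1).choose K : ℤ) * (n + 1 - K)
            = ((n.toNat+1).choose (K+1) : ℤ) * ((K:ℤ)+1) := by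
          have hn' : (n.toNat : ℤ) = n := Int.toNat_of_nonneg hn
          push_cast at hc ⊢
          rw [hn'] at hc
          linarith
        rw [hnum, fdiv_exact _ _ (by positivity)]
      · show -(-1:ℤ)^K = _
        rw [pow_succ]
        ring
  have hm1 : ((m.toNat + 1 : ℕ) : ℤ) = m + 1 := by omega
  have h := hloop (m.toNat+1) (by omega)
  rw [hm1] at h
  unfold eulerianNumber_alt
  rw [h, Srow]
  show (Finset.sum (Finset.range (m.toNat+1)) (fun k => (-1:ℤ)^k * ((n.toNat+1).choose k : ℤ) * (m+1-(k:ℤ))^n.toNat)) = _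
  apply Finset.sum_congr rfl
  intro k _
  have hmn : ((m.toNat : ℤ)) = m := Int.toNat_of_nonneg hm
  rw [hmn]

-- getD/set helpers
lemma getD_set_self {α} (l : List α) (i : ℕ) (a d : α) (h : i < l.length) :
    (l.set i a).getD i d = a := by
  simp [List.getD_eq_getElem?_getD, h]

lemma getD_set_ne {α} (l : List α) (i j : ℕ) (a d : α) (h : i ≠ j) :
    (l.set i a).getD j d = l.getD j d := by
  simp [List.getD_eq_getElem?_getD, List.getElem?_set_ne h]

lemma set_getD_self {α} (l : List α) (i : ℕ) (d : α) (h : i < l.length) :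
    l.set i (l.getD i d) = l := by
  rw [List.getD_eq_getElem?_getD, List.getElem?_eq_getElem h]
  simp

lemma getD_replicate_lt {α} (n a : ℕ) (c d : α) (h : a < n) :
    (List.replicate n c).getD a d = c := by
  simp [List.getD_eq_getElem?_getD, h]

-- generic length preservation
lemma foldl_len {α β} (f : List α → β → List α) (hf : ∀ xs b, (f xs b).length = xs.length) :
    ∀ (L : List β) (xs : List α), (L.foldl f xs).length = xs.length := by
  intro L
  induction L with
  | nil => intro xs; rfl
  | cons b L ih => intro xs; rw [List.foldl_cons, ih, hf]

-- dp1 characterization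
lemma fold1_getD : ∀ (L : List Int), (∀ i ∈ L, 0 ≤ i) →
    ∀ (dp : List (List Int)) (q : ℕ), q < dp.length →
    (L.foldl (fun dp i => pySet2 dp i 0 1) dp).getD q []
      = if (q:ℤ) ∈ L then (dp.getD q []).set 0 1 else dp.getD q [] := by
  intro L
  induction L with
  | nil => intro _ dp q hq; simp
  | cons i L ih =>
    intro hpos dp q hq
    rw [List.foldl_cons]
    have hi : 0 ≤ i := hpos i (by simp)
    have hlen : (pySet2 dp i 0 1).length = dp.length := by
      simp [pySet2]
    rw [ih (fun j hj => hpos j (by simp [hj])) _ q (by omega)]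
    by_cases hqi : (q:ℤ) = i
    · have hqn : i.toNat = q := by omega
      have hset : (pySet2 dp i 0 1).getD q [] = (dp.getD q []).set 0 1 := by
        rw [pySet2, hqn, getD_set_self _ _ _ _ (by omega)]
        norm_num
      rw [hset]
      simp only [List.mem_cons, hqi, true_or, if_pos]
      split_ifs with h
      · rw [List.set_set]
      · rfl
    · have hqn : i.toNat ≠ q := by omega
      have hset : (pySet2 dp i 0 1).getD q [] = dp.getD q [] := by
        rw [pySet2, getD_set_ne _ _ _ _ _ hqn]
      rw [hset]
      simp [List.mem_cons, hqi]

-- generic state-independent set-fold over a row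
lemma foldset_getD {α} (v : Int → α) (d : α) : ∀ (L : List Int), (∀ i ∈ L, 0 ≤ i) →
    ∀ (xs : List α) (q : ℕ), q < xs.length →
    (L.foldl (fun xs j => xs.set j.toNat (v j)) xs).getD q d
      = if (q:ℤ) ∈ L then v q else xs.getD q d := by
  intro L
  induction L with
  | nil => intro _ xs q hq; simp
  | cons i L ih =>
    intro hpos xs q hq
    rw [List.foldl_cons]
    have hi : 0 ≤ i := hpos i (by simp)
    rw [ih (fun j hj => hpos j (by simp [hj])) _ q (by simp [List.length_set]; omega)]
    by_cases hqi : (q:ℤ) = i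
    · have hqn : i.toNat = q := by omega
      simp only [List.mem_cons, hqi, true_or, if_pos]
      split_ifs with h
      · rfl
      · rw [hqn, getD_set_self _ _ _ _ hq]
    · have hqn : i.toNat ≠ q := by omega
      rw [getD_set_ne _ _ _ _ _ hqn]
      simp [List.mem_cons, hqi]

def Vexpr (dp : List (List Int)) (i j : Int) : Int :=
  (i-j) * PySem.List.pyGetD (PySem.List.pyGetD dp (i-1) []) (j-1) 0
  + (j+1) * PySem.List.pyGetD (PySem.List.pyGetD dp (i-1) []) j 0

lemma inner_eq : ∀ (L : List Int) (dp : List (List Int)) (i : Int), 2 ≤ i → i.toNat < dp.length →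
    L.foldl (fun dp j => pySet2 dp i j (Vexpr dp i j)) dp
      = dp.set i.toNat (L.foldl (fun row j => row.set j.toNat (Vexpr dp i j)) (dp.getD i.toNat [])) := by
  intro L
  induction L with
  | nil =>
    intro dp i hi hlen
    exact (set_getD_self dp i.toNat [] hlen).symm
  | cons j L ih =>
    intro dp i hi hlen
    rw [List.foldl_cons, List.foldl_cons]
    set dp' := pySet2 dp i j (Vexpr dp i j) with hdp'
    have hlen' : i.toNat < dp'.length := by simp [hdp', pySet2]; omega
    rw [ih dp' i hi hlen']
    have hV : ∀ j' : Int, Vexpr dp' i j' = Vexpr dp i j' := by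
      intro j'
      have h1 : PySem.List.pyGetD dp' (i-1) [] = PySem.List.pyGetD dp (i-1) [] := by
        rw [PySem.List.pyGetD_of_nonneg _ _ (by omega), PySem.List.pyGetD_of_nonneg _ _ (by omega)]
        rw [hdp', pySet2]
        exact getD_set_ne _ _ _ _ _ (by omega)
      rw [Vexpr, Vexpr, h1]
    have hrow : dp'.getD i.toNat [] = (dp.getD i.toNat []).set j.toNat (Vexpr dp i j) := by
      rw [hdp', pySet2]
      exact getD_set_self _ _ _ _ hlen
    have hset : ∀ X, dp'.set i.toNat X = dp.set i.toNat X := by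
      intro X
      rw [hdp', pySet2, List.set_set]
    simp only [hV, hrow, hset]

def orowL (m : Int) : List Int := (List.replicate (m+1).toNat (0:Int)).set 0 1

def VexprRow (prev : List Int) (i j : Int) : Int :=
  (i-j) * PySem.List.pyGetD prev (j-1) 0 + (j+1) * PySem.List.pyGetD prev j 0

def FRow (n m : Int) : ℕ → List Int
  | 0 => List.replicate (m+1).toNat 0
  | 1 => orowL m
  | (i+2) => (PySem.List.pyRange 1 (min n (m+1)) 1).foldl
      (fun row j => row.set j.toNat (VexprRow (FRow n m (i+1)) ((i:ℤ)+2) j)) (orowL m)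

lemma Vexpr_eq_row (dp : List (List Int)) (i j : Int) :
    Vexpr dp i j = VexprRow (PySem.List.pyGetD dp (i-1) []) i j := rfl

lemma outer_char (n m : Int) (hn : 0 ≤ n) (hm : 0 ≤ m)
    (dp : List (List Int)) (hlen : dp.length = n.toNat + 1)
    (hrows : ∀ q : ℕ, q ≤ n.toNat →
      dp.getD q [] = if q = 0 then List.replicate (m+1).toNat 0 else orowL m) :
    ∀ t : ℕ, (t:ℤ) ≤ n →
    ((PySem.List.pyRange 2 ((t:ℤ)+1) 1).foldl
        (fun dp i => (PySem.List.pyRange 1 (min n (m+1)) 1).foldl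
          (fun dp j => pySet2 dp i j (Vexpr dp i j)) dp) dp).length = n.toNat + 1 ∧
    ∀ q : ℕ, q ≤ n.toNat →
      ((PySem.List.pyRange 2 ((t:ℤ)+1) 1).foldl
        (fun dp i => (PySem.List.pyRange 1 (min n (m+1)) 1).foldl
          (fun dp j => pySet2 dp i j (Vexpr dp i j)) dp) dp).getD q []
      = if q ≤ max t 1 then FRow n m q else orowL m := by
  intro t
  induction t with
  | zero =>
    intro _
    rw [show ((0:ℕ):ℤ)+1 = 1 by norm_num,
        show PySem.List.pyRange 2 (1:ℤ) 1 = [] from PySem.List.pyRange_one_eq_nil (by omega)]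
    simp only [List.foldl_nil]
    refine ⟨hlen, ?_⟩
    intro q hq
    rw [hrows q hq]
    rcases Nat.eq_zero_or_pos q with h0 | h1
    · subst h0; simp [FRow]
    · have : ¬ (q = 0) := by omega
      rw [if_neg this]
      by_cases hq1 : q ≤ 1
      · have : q = 1 := by omega
        subst this
        simp [FRow]
      · rw [if_neg (by omega)]
  | succ t ih =>
    intro ht
    rcases Nat.eq_zero_or_pos t with h0 | h1
    · subst h0
      rw [show (((0:ℕ)+1:ℕ):ℤ)+1 = 2 by norm_num,
          show PySem.List.pyRange 2 (2:ℤ) 1 = [] from PySem.List.pyRange_one_eq_nil (by omega)]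
      simp only [List.foldl_nil]
      refine ⟨hlen, ?_⟩
      intro q hq
      rw [hrows q hq]
      rcases Nat.eq_zero_or_pos q with h0 | hq1
      · subst h0; simp [FRow]
      · rw [if_neg (by omega)]
        by_cases hq1' : q ≤ 1
        · have : q = 1 := by omega
          subst this
          simp [FRow]
        · rw [if_neg (by omega)]
    · obtain ⟨hL, hQ⟩ := ih (by omega)
      have hsplit : PySem.List.pyRange 2 ((t:ℤ)+1+1) 1
          = PySem.List.pyRange 2 ((t:ℤ)+1) 1 ++ [(t:ℤ)+1] := by
        exact PySem.List.pyRange_one_succ_right (by omega)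
      rw [show (((t+1:ℕ)):ℤ)+1 = ((t:ℤ)+1)+1 by push_cast; ring, hsplit, List.foldl_append]
      set dpt := (PySem.List.pyRange 2 ((t:ℤ)+1) 1).foldl
          (fun dp i => (PySem.List.pyRange 1 (min n (m+1)) 1).foldl
            (fun dp j => pySet2 dp i j (Vexpr dp i j)) dp) dp with hdpt
      simp only [List.foldl_cons, List.foldl_nil]
      have hti : ((t:ℤ)+1).toNat = t + 1 := by omega
      have hinner := inner_eq (PySem.List.pyRange 1 (min n (m+1)) 1) dpt ((t:ℤ)+1)
          (by omega) (by rw [hti, hL]; omega)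
      rw [hinner]
      have hprev : PySem.List.pyGetD dpt ((t:ℤ)+1-1) [] = FRow n m t := by
        rw [show (t:ℤ)+1-1 = (t:ℤ) by ring, PySem.List.pyGetD_of_nonneg _ _ (by omega)]
        rw [show ((t:ℤ)).toNat = t by omega]
        rw [hQ t (by omega), if_pos (le_max_left t 1)]
      have hcur : dpt.getD ((t:ℤ)+1).toNat [] = orowL m := by
        rw [hti, hQ (t+1) (by omega), if_neg (by omega)]
      have hVe : ∀ j : Int, Vexpr dpt ((t:ℤ)+1) j = VexprRow (FRow n m t) ((t:ℤ)+1) j := by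
        intro j
        rw [Vexpr_eq_row, hprev]
      have hnewrow : (PySem.List.pyRange 1 (min n (m+1)) 1).foldl
          (fun row j => row.set j.toNat (Vexpr dpt ((t:ℤ)+1) j)) (dpt.getD ((t:ℤ)+1).toNat [])
          = FRow n m (t+1) := by
        obtain ⟨t', rfl⟩ : ∃ t', t = t' + 1 := ⟨t - 1, by omega⟩
        rw [hcur, FRow]
        simp only [hVe]
        rw [show ((t'+1:ℕ):ℤ)+1 = (t':ℤ)+2 by push_cast; ring]
      rw [hnewrow]
      constructor
      · rw [List.length_set, hL]
      · intro q hq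
        rw [hti]
        by_cases hqt : q = t + 1
        · subst hqt
          rw [getD_set_self _ _ _ _ (by rw [hL]; omega), if_pos (by omega)]
        · rw [getD_set_ne _ _ _ _ _ (by omega), hQ q hq]
          simp only [show (q ≤ max (t+1) 1) ↔ (q ≤ max t 1) from by omega]

lemma orowL_getD (m : Int) (hm : 0 ≤ m) (q : ℕ) (hq : (q:ℤ) ≤ m) :
    (orowL m).getD q 0 = if q = 0 then 1 else 0 := by
  rcases Nat.eq_zero_or_pos q with h0 | h1
  · subst h0
    rw [orowL, getD_set_self _ _ _ _ (by simp; omega), if_pos rfl]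
  · rw [orowL, getD_set_ne _ _ _ _ _ (by omega), getD_replicate_lt _ _ _ _ (by omega),
        if_neg (by omega)]

lemma FRow_cell (n m : Int) (hn : 0 ≤ n) (hm : 0 ≤ m) :
    ∀ i : ℕ, (i:ℤ) ≤ n → ∀ q : ℕ, (q:ℤ) ≤ m → (FRow n m i).getD q 0 = Elr i q := by
  intro i
  induction i with
  | zero =>
    intro _ q hq
    rw [FRow, getD_replicate_lt _ _ _ _ (by omega)]
    simp [Elr]
  | succ i ih =>
    intro hi q hq
    match i, ih with
    | 0, _ =>
      rw [show (0:ℕ)+1 = 1 from rfl, FRow, orowL_getD m hm q hq]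
      rcases Nat.eq_zero_or_pos q with h0 | h1
      · subst h0; rfl
      · rw [if_neg (by omega), Elr_zero 1 q (by omega)]
    | (i'+1), ih =>
      rw [show i'+1+1 = i'+2 from rfl, FRow]
      have hmem : ∀ j ∈ PySem.List.pyRange 1 (min n (m+1)) 1, 0 ≤ j := by
        intro j hj
        rw [PySem.List.mem_pyRange_one] at hj
        omega
      rw [foldset_getD _ _ _ hmem _ q (by rw [orowL]; simp; omega)]
      by_cases hqmem : (q:ℤ) ∈ PySem.List.pyRange 1 (min n (m+1)) 1
      · rw [if_pos hqmem]
        rw [PySem.List.mem_pyRange_one] at hqmem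
        obtain ⟨q', rfl⟩ : ∃ q', q = q' + 1 := ⟨q - 1, by omega⟩
        rw [VexprRow]
        have e1 : ((q'+1:ℕ):ℤ) - 1 = ((q':ℕ):ℤ) := by push_cast; ring
        rw [e1, PySem.List.pyGetD_of_nonneg _ _ (by omega),
            PySem.List.pyGetD_of_nonneg _ _ (by omega)]
        rw [show ((q':ℕ):ℤ).toNat = q' by omega, show ((q'+1:ℕ):ℤ).toNat = q'+1 by omega]
        rw [ih (by omega) q' (by omega), ih (by omega) (q'+1) (by omega),
            Elr_succ_succ (i'+1) q']
        push_cast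
        ring
      · rw [if_neg hqmem, orowL_getD m hm q hq]
        rw [PySem.List.mem_pyRange_one] at hqmem
        push_neg at hqmem
        rcases Nat.eq_zero_or_pos q with h0 | h1
        · subst h0; rfl
        · rw [if_neg (by omega)]
          have hcap : min n (m+1) ≤ (q:ℤ) := hqmem (by omega)
          have : (n:ℤ) ≤ (q:ℤ) := by
            rcases min_cases n (m+1) with ⟨he, _⟩ | ⟨he, _⟩ <;> omega
          rw [Elr_zero (i'+2) q (by omega)]

def dpZero (n m : Int) : List (List Int) :=
  (PySem.List.pyRange 0 (n+1) 1).map (fun _ => (PySem.List.pyRange 0 (m+1) 1).map (fun _ => (0:Int)))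

def dpOne (n m : Int) : List (List Int) :=
  (PySem.List.pyRange 1 (n+1) 1).foldl (fun dp i => pySet2 dp i 0 1) (dpZero n m)

def dpTwo (n m : Int) : List (List Int) :=
  (PySem.List.pyRange 2 (n+1) 1).foldl (fun dp i =>
      (PySem.List.pyRange 1 (min n (m+1)) 1).foldl
        (fun dp j => pySet2 dp i j (Vexpr dp i j)) dp) (dpOne n m)

lemma port_eq (n m : Int) :
    eulerianNumber n m = PySem.List.pyGetD (PySem.List.pyGetD (dpTwo n m) n []) m 0 := rfl

lemma map_const_replicate {α β : Type} (c : β) : ∀ (l : List α),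
    l.map (fun _ => c) = List.replicate l.length c := by
  intro l
  induction l with
  | nil => rfl
  | cons a l ih => simp [List.replicate_succ, ih]

lemma A_eq_Elr (n m : Int) (hn : 0 ≤ n) (hm : 0 ≤ m) :
    eulerianNumber n m = Elr n.toNat m.toNat := by
  have hn' : ((n.toNat : ℕ) : ℤ) = n := Int.toNat_of_nonneg hn
  have hm' : ((m.toNat : ℕ) : ℤ) = m := Int.toNat_of_nonneg hm
  have hz : (PySem.List.pyRange 0 (m+1) 1).map (fun _ => (0:Int))
      = List.replicate (m+1).toNat 0 := by
    rw [map_const_replicate, PySem.List.length_pyRange_one]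
    norm_num
  have hdp0 : dpZero n m = List.replicate (n+1).toNat (List.replicate (m+1).toNat (0:Int)) := by
    rw [dpZero, hz, map_const_replicate, PySem.List.length_pyRange_one]
    norm_num
  have hdp0len : (dpZero n m).length = n.toNat + 1 := by
    rw [hdp0, List.length_replicate]
    omega
  have hdp1len : (dpOne n m).length = n.toNat + 1 := by
    rw [dpOne, foldl_len _ (fun dp i => by simp [pySet2]), hdp0len]
  have hrows1 : ∀ q : ℕ, q ≤ n.toNat →
      (dpOne n m).getD q [] = if q = 0 then List.replicate (m+1).toNat 0 else orowL m := by
    intro q hq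
    rw [dpOne, fold1_getD _ (fun i hi => by rw [PySem.List.mem_pyRange_one] at hi; omega)
        _ q (by omega)]
    have hdz : (dpZero n m).getD q [] = List.replicate (m+1).toNat 0 := by
      rw [hdp0, getD_replicate_lt _ _ _ _ (by omega)]
    rw [hdz]
    by_cases h0 : q = 0
    · subst h0
      rw [if_neg (by rw [PySem.List.mem_pyRange_one]; omega), if_pos rfl]
    · rw [if_pos (by rw [PySem.List.mem_pyRange_one]; omega), if_neg h0]
      rfl
  obtain ⟨hL2, hQ2⟩ := outer_char n m hn hm (dpOne n m) hdp1len hrows1 n.toNat (by omega)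
  rw [hn'] at hQ2
  have hdp2 : ∀ q : ℕ, q ≤ n.toNat →
      (dpTwo n m).getD q [] = if q ≤ max n.toNat 1 then FRow n m q else orowL m := hQ2
  rw [port_eq]
  have hfin1 : PySem.List.pyGetD (dpTwo n m) n [] = FRow n m n.toNat := by
    rw [PySem.List.pyGetD_of_nonneg _ _ hn, hdp2 n.toNat (le_refl _),
        if_pos (le_max_left _ _)]
  rw [hfin1, PySem.List.pyGetD_of_nonneg _ _ hm]
  exact FRow_cell n m hn hm n.toNat (by omega) m.toNat (by omega)

-- final bridges
lemma unchanged_main (n m : Int) (hn : 0 ≤ n) (hm : 0 ≤ m) (hnd : ¬ D_eulerianNumber n m) :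
    eulerianNumber n m = eulerianNumber_alt n m := by
  rw [A_eq_Elr n m hn hm, alt_eq_Srow n m hn hm]
  rcases Nat.eq_zero_or_pos n.toNat with h0 | h1
  · have hn0 : n = 0 := by omega
    have hm0 : m ≠ 0 := fun hm0 => hnd ⟨hn0, hm0⟩
    rw [h0, Srow_zero m.toNat (by omega)]
    rfl
  · obtain ⟨N, hN⟩ : ∃ N, n.toNat = N + 1 := ⟨n.toNat - 1, by omega⟩
    rw [hN]
    exact Elr_eq_Srow N m.toNat

-- ===== VERDICT (by name: the statement is the Claim_ definition above) =====
theorem eulerianNumber_spec : Claim_unchanged_eulerianNumber := by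
  intro n m _ hpre hnd
  exact unchanged_main n m hpre.1 hpre.2 hnd

theorem eulerianNumber_changed : Claim_changed_eulerianNumber := by
  unfold Claim_changed_eulerianNumber
  decide

theorem eulerianNumber_tight : Claim_exact_eulerianNumber := by
  intro n m _ _ hd
  obtain ⟨rfl, rfl⟩ := hd
  decide
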